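-- pv_equiv track=rewrite | github.com/dzjxzyd/R-PeptideCutter | R-PeptideCutter_for_two_enzymes.py | chymo_low
-- ===== SOURCE A (Python) =====
-- def chymo_low(seq,seq_len):
--     cleavage=[]
--     for i in range(seq_len):
--         if i < seq_len-1:
--             if seq[i]=='F' or seq[i] == 'L' or seq[i] == 'Y':
--                 if seq[i+1] != 'P':
--                     cleavage.append(i)
--             if seq[i]=='W' :
--                 if seq[i+1] != 'P' and seq[i] != 'M':
--                     cleavage.append(i)
--             if seq[i]=='M' :
--                 if seq[i+1] != 'P' and seq[i] != 'Y':
--                     cleavage.append(i)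
--             if seq[i]=='H' :
--                 if seq[i+1] != 'D' and seq[i] != 'M' and seq[i] != 'P' and seq[i] != 'W':
--                     cleavage.append(i)
--     return cleavage
-- ===== SOURCE B (Python) =====
-- RULES = (('F', 'P'), ('L', 'P'), ('Y', 'P'), ('W', 'P'), ('M', 'P'), ('H', 'D'))
--
-- def chymo_low(seq, seq_len):
--     # staged passes: one scan per cleavage rule, then sort the merged positions
--     hits = []
--     for res, forb in RULES:
--         for i in range(seq_len - 1):
--             if seq[i] == res and seq[i + 1] != forb:
--                 hits.append(i)
--     return sorted(hits)
-- ===== Notes on version B (the rewrite author's own statement) =====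
-- stated objective: alternative
-- what changed: B replaces A's single indexed loop with a chain of per-residue if-branches by staged passes: one scan of the sequence per cleavage rule (residue, forbidden successor) collecting that rule's positions, followed by a sort of the merged hit list; correct because each position matches at most one rule, so the sorted merge of the disjoint per-rule hits is exactly A's in-order list.
import Mathlib
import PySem

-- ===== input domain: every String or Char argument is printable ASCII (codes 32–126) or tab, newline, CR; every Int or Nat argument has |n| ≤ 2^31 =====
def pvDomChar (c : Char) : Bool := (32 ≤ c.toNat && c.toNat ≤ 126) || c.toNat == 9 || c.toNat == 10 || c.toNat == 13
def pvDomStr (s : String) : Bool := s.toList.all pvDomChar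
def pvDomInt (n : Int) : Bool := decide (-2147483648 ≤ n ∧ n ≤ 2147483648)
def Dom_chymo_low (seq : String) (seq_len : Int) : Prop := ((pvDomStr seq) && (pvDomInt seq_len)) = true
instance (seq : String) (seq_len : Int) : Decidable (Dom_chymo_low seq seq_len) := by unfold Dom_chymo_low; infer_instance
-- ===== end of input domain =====

-- B replaces A's single indexed loop with its per-residue branch chain by staged passes: one scan
-- per cleavage rule collecting that rule's positions, then a sort of the merged hits (objective: alternative).

-- ===== PORT A =====
def chymo_low (seq : String) (seq_len : Int) : List Int :=
  (PySem.List.pyRange 0 seq_len 1).foldl (fun cleavage i =>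
    if i < seq_len - 1 then
      let c := PySem.List.pyGetD seq.toList i ' '        -- seq[i]; in range under Pre_
      let c1 := PySem.List.pyGetD seq.toList (i + 1) ' ' -- seq[i+1]; in range whenever Python evaluates it, under Pre_
      let cleavage := if c = 'F' ∨ c = 'L' ∨ c = 'Y' then
          (if c1 ≠ 'P' then cleavage ++ [i] else cleavage) else cleavage
      let cleavage := if c = 'W' then
          (if c1 ≠ 'P' ∧ c ≠ 'M' then cleavage ++ [i] else cleavage) else cleavage
      let cleavage := if c = 'M' then
          (if c1 ≠ 'P' ∧ c ≠ 'Y' then cleavage ++ [i] else cleavage) else cleavage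
      let cleavage := if c = 'H' then
          (if c1 ≠ 'D' ∧ c ≠ 'M' ∧ c ≠ 'P' ∧ c ≠ 'W' then cleavage ++ [i] else cleavage) else cleavage
      cleavage
    else cleavage) []

-- ===== PORT B =====
def chymoRules : List (Char × Char) :=
  [('F','P'), ('L','P'), ('Y','P'), ('W','P'), ('M','P'), ('H','D')]

def chymo_low_alt (seq : String) (seq_len : Int) : List Int :=
  PySem.List.sorted
    (chymoRules.foldl (fun hits rf =>
      (PySem.List.pyRange 0 (seq_len - 1) 1).foldl (fun hits i =>
        if (PySem.List.pyGetD seq.toList i ' ' == rf.1) &&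
           (PySem.List.pyGetD seq.toList (i + 1) ' ' != rf.2)
        then hits ++ [i] else hits) hits) [])
    (fun x => x) false

-- ===== PRECONDITION & SPEC =====
-- Pre_ excludes exactly the inputs where the Python A raises IndexError: seq_len ≥ len(seq)+2, or
-- seq_len = len(seq)+1 with a cleavable (F/L/Y/W/M/H) last residue, which makes A read seq[seq_len-1].
def Pre_chymo_low (seq : String) (seq_len : Int) : Prop :=
  seq_len ≤ (seq.toList.length : Int) ∨
    (seq_len = (seq.toList.length : Int) + 1 ∧
      (seq.toList = [] ∨ seq.toList.getLast? ∉ [some 'F', some 'L', some 'Y', some 'W', some 'M', some 'H']))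
instance (seq : String) (seq_len : Int) : Decidable (Pre_chymo_low seq seq_len) := by
  unfold Pre_chymo_low; infer_instance

def pvWitness_chymo_low : String × Int := ("FLYWMHAP", 8)

def Spec_chymo_low (seq : String) (seq_len : Int) (out : List Int) : Prop := out = chymo_low_alt seq seq_len
instance (seq : String) (seq_len : Int) (out : List Int) : Decidable (Spec_chymo_low seq seq_len out) := by unfold Spec_chymo_low; infer_instance

-- ===== CLAIM (what is proved, stated in full; the proofs are below) =====
def Claim_equal_chymo_low : Prop := ∀ (seq : String) (seq_len : Int), Dom_chymo_low seq seq_len → Pre_chymo_low seq seq_len → Spec_chymo_low seq seq_len (chymo_low seq seq_len)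

-- ===== LEMMAS AND PROOFS =====

-- The cleavage condition that A's branch chain tests at position i (the redundant self-guards dropped).
abbrev cleavQ (s : List Char) (n : Int) (i : Int) : Prop :=
  i < n - 1 ∧
    ((PySem.List.pyGetD s i ' ' = 'F' ∨ PySem.List.pyGetD s i ' ' = 'L' ∨
        PySem.List.pyGetD s i ' ' = 'Y' ∨ PySem.List.pyGetD s i ' ' = 'W' ∨
        PySem.List.pyGetD s i ' ' = 'M') ∧ PySem.List.pyGetD s (i + 1) ' ' ≠ 'P' ∨
      (PySem.List.pyGetD s i ' ' = 'H' ∧ PySem.List.pyGetD s (i + 1) ' ' ≠ 'D'))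

-- B's test for one rule at position i.
abbrev ruleQ (s : List Char) (rf : Char × Char) (i : Int) : Bool :=
  (PySem.List.pyGetD s i ' ' == rf.1) && (PySem.List.pyGetD s (i + 1) ' ' != rf.2)

-- A's branch chain at one position, collapsed to a single condition.
lemma branch_eq (c c1 : Char) (acc : List Int) (i : Int) :
    (let cl1 := if c = 'F' ∨ c = 'L' ∨ c = 'Y' then (if c1 ≠ 'P' then acc ++ [i] else acc) else acc
     let cl2 := if c = 'W' then (if c1 ≠ 'P' ∧ c ≠ 'M' then cl1 ++ [i] else cl1) else cl1
     let cl3 := if c = 'M' then (if c1 ≠ 'P' ∧ c ≠ 'Y' then cl2 ++ [i] else cl2) else cl2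
     if c = 'H' then (if c1 ≠ 'D' ∧ c ≠ 'M' ∧ c ≠ 'P' ∧ c ≠ 'W' then cl3 ++ [i] else cl3) else cl3) =
    if (c = 'F' ∨ c = 'L' ∨ c = 'Y' ∨ c = 'W' ∨ c = 'M') ∧ c1 ≠ 'P' ∨ (c = 'H' ∧ c1 ≠ 'D')
      then acc ++ [i] else acc := by
  split_ifs <;> simp_all

lemma chymo_low_eq_filter (seq : String) (n : Int) :
    chymo_low seq n = (PySem.List.pyRange 0 n 1).filter (fun i => decide (cleavQ seq.toList n i)) := by
  unfold chymo_low
  refine Eq.trans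
    (List.foldl_ext _ (fun acc i => if cleavQ seq.toList n i then acc ++ [i] else acc) [] ?_) ?_
  · intro acc i _
    by_cases h : i < n - 1
    · rw [if_pos h]
      exact (branch_eq (PySem.List.pyGetD seq.toList i ' ')
        (PySem.List.pyGetD seq.toList (i + 1) ' ') acc i).trans (by simp [cleavQ, h])
    · rw [if_neg h]
      exact (if_neg (fun hc : cleavQ seq.toList n i => h hc.1)).symm
  · rw [PySem.List.foldl_append_ite_eq_filter]
    simp

-- B's per-rule any-test agrees with A's collapsed branch condition at each position.
lemma any_rules_eq (s : List Char) (n i : Int) (hi : i < n - 1) :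
    chymoRules.any (fun rf => ruleQ s rf i) = decide (cleavQ s n i) := by
  simp only [chymoRules, ruleQ, List.any_cons, List.any_nil, cleavQ]
  by_cases h : PySem.List.pyGetD s (i + 1) ' ' = 'P' <;>
    by_cases hD : PySem.List.pyGetD s (i + 1) ' ' = 'D' <;>
      simp [h, hD, hi, Bool.beq_eq_decide_eq, bne, Bool.or_assoc]

-- Concatenating the filters of two pointwise-disjoint tests is a permutation of the joint filter.
lemma filter_or_perm {α : Type} (p q : α → Bool) (l : List α)
    (h : ∀ x ∈ l, ¬(p x = true ∧ q x = true)) :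
    (l.filter p ++ l.filter q).Perm (l.filter (fun x => p x || q x)) := by
  induction l with
  | nil => simp
  | cons a t ih =>
    have ht : ∀ x ∈ t, ¬(p x = true ∧ q x = true) := fun x hx => h x (List.mem_cons_of_mem a hx)
    by_cases hp : p a = true
    · have hq : q a = false := by
        cases hqa : q a
        · rfl
        · exact absurd ⟨hp, hqa⟩ (h a List.mem_cons_self)
      simp only [List.filter_cons, hp, hq, Bool.true_or, if_true, Bool.false_eq_true, if_false,
        List.cons_append]
      exact (ih ht).cons a
    · rw [Bool.not_eq_true] at hp
      by_cases hq : q a = true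
      · simp only [List.filter_cons, hp, hq, Bool.false_or, Bool.false_eq_true, if_false, if_true]
        exact List.perm_middle.trans ((ih ht).cons a)
      · rw [Bool.not_eq_true] at hq
        simp only [List.filter_cons, hp, hq, Bool.false_or, Bool.false_eq_true, if_false]
        exact ih ht

-- The staged per-rule filters, concatenated, are a permutation of the single-pass filter,
-- because the rules' residues are pairwise distinct so each position matches at most one rule.
lemma flatMap_rules_perm (s : List Char) (rs : List (Char × Char)) (l : List Int)
    (hnd : (rs.map Prod.fst).Nodup) :
    (rs.flatMap (fun rf => l.filter (ruleQ s rf))).Perm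
      (l.filter (fun i => rs.any (fun rf => ruleQ s rf i))) := by
  induction rs with
  | nil => simp
  | cons r rs ih =>
    simp only [List.flatMap_cons, List.any_cons]
    rw [List.map_cons, List.nodup_cons] at hnd
    refine ((ih hnd.2).append_left (l.filter (ruleQ s r))).trans ?_
    refine filter_or_perm _ _ l ?_
    rintro i - ⟨h1, h2⟩
    rw [List.any_eq_true] at h2
    obtain ⟨rf, hrf, hq⟩ := h2
    simp only [ruleQ, Bool.and_eq_true, beq_iff_eq] at h1 hq
    exact hnd.1 (h1.1 ▸ hq.1 ▸ List.mem_map_of_mem hrf)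

lemma chymo_low_alt_eq (seq : String) (n : Int) :
    chymo_low_alt seq n =
      PySem.List.sorted
        (chymoRules.flatMap (fun rf => (PySem.List.pyRange 0 (n - 1) 1).filter (ruleQ seq.toList rf)))
        (fun x => x) false := by
  unfold chymo_low_alt
  congr 1
  refine Eq.trans
    (List.foldl_ext _
      (fun hits rf => hits ++ (PySem.List.pyRange 0 (n - 1) 1).filter (ruleQ seq.toList rf)) [] ?_) ?_
  · intro acc rf _
    exact PySem.List.foldl_append_if_eq_filter _ _ _
  · rw [PySem.List.foldl_append_eq_flatMap]
    simp

-- ===== VERDICT (by name: the statement is the Claim_ definition above) =====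
theorem chymo_low_spec : Claim_equal_chymo_low := by
  intro seq n _ _
  unfold Spec_chymo_low
  rw [chymo_low_eq_filter, chymo_low_alt_eq]
  set s := seq.toList with hs
  have hA : (PySem.List.pyRange 0 n 1).filter (fun i => decide (cleavQ s n i))
      = (PySem.List.pyRange 0 (n - 1) 1).filter (fun i => chymoRules.any (fun rf => ruleQ s rf i)) := by
    by_cases hn : n ≤ 0
    · rw [PySem.List.pyRange_one_eq_nil hn, PySem.List.pyRange_one_eq_nil (by omega : n - 1 ≤ 0)]
      simp
    · rw [PySem.List.pyRange_one_append 0 (n - 1) n (by omega) (by omega), List.filter_append]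
      have h2 : (PySem.List.pyRange (n - 1) n 1).filter (fun i => decide (cleavQ s n i)) = [] := by
        refine List.filter_eq_nil_iff.mpr ?_
        intro i hi
        have hb := PySem.List.mem_pyRange_one.mp hi
        simp only [decide_eq_true_eq, cleavQ]
        rintro ⟨h1, -⟩
        omega
      rw [h2, List.append_nil]
      refine List.filter_congr ?_
      intro i hi
      have hb := PySem.List.mem_pyRange_one.mp hi
      exact (any_rules_eq s n i (by omega)).symm
  rw [hA]
  refine (PySem.List.sorted_eq_of_perm_of_pairwise_lt _ _ (fun x => x)
    ((flatMap_rules_perm s chymoRules _ (by decide)).symm) ?_).symm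
  exact (PySem.List.pairwise_lt_pyRange_one 0 (n - 1)).filter _
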